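-- pv_equiv track=rewrite | github.com/grapheneaffiliate/h4-polytopic-attention | solve_arc2_train_ad.py | solve_9344f635
-- ===== SOURCE A (Python) =====
-- def solve_9344f635(grid):
--     """Non-bg cells that are horizontally adjacent fill entire row; others fill entire column."""
--     R,C=len(grid),len(grid[0])
--     bg=7
--     out=[[bg]*C for _ in range(R)]
--     col_fills={}
--     row_fills={}
--     # Find horizontally adjacent pairs/groups of same non-bg color
--     for r in range(R):
--         for c in range(C-1):
--             if grid[r][c]!=bg and grid[r][c+1]!=bg and grid[r][c]==grid[r][c+1]:
--                 row_fills[r]=grid[r][c]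
--     # Find column singletons: non-bg cells that are NOT part of a horizontal pair
--     for r in range(R):
--         for c in range(C):
--             if grid[r][c]!=bg:
--                 # Check if this cell is part of a horizontal pair
--                 is_horiz = False
--                 if c>0 and grid[r][c-1]==grid[r][c]: is_horiz=True
--                 if c<C-1 and grid[r][c+1]==grid[r][c]: is_horiz=True
--                 if not is_horiz:
--                     col_fills[c]=grid[r][c]
--     for c,col in col_fills.items():
--         for r in range(R): out[r][c]=col
--     for r,col in row_fills.items():
--         for c in range(C): out[r][c]=col
--     return out
-- ===== SOURCE B (Python) =====
-- def solve_9344f635(grid):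
--     """Non-bg cells that are horizontally adjacent fill entire row; others fill entire column."""
--     R, C = len(grid), len(grid[0])
--     bg = 7
--     row_color = {}
--     col_color = {}
--     # Run-length decomposition of each row: a maximal run of a non-bg color of
--     # length >= 2 marks its row, a length-1 run marks its column.
--     for r, row in enumerate(grid):
--         c = 0
--         while c < C:
--             v = row[c]
--             j = c
--             while j + 1 < C and row[j + 1] == v:
--                 j += 1
--             if v != bg:
--                 if j > c:
--                     row_color[r] = v
--                 else:
--                     col_color[c] = v
--             c = j + 1
--     # A marked row is entirely its color; other rows are built from column marks.
--     return [[row_color[r]] * C if r in row_color else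
--             [col_color.get(c, bg) for c in range(C)]
--             for r in range(R)]
-- ===== Notes on version B (the rewrite author's own statement) =====
-- stated objective: alternative
-- what changed: B replaces A's two per-cell neighbour-testing passes and its paint-background-then-overwrite output construction by a run-length decomposition of each row (a maximal non-bg run of length >= 2 marks its row, a length-1 run marks its column) and builds every output row directly from the marks, touching each cell once.
import Mathlib
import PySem

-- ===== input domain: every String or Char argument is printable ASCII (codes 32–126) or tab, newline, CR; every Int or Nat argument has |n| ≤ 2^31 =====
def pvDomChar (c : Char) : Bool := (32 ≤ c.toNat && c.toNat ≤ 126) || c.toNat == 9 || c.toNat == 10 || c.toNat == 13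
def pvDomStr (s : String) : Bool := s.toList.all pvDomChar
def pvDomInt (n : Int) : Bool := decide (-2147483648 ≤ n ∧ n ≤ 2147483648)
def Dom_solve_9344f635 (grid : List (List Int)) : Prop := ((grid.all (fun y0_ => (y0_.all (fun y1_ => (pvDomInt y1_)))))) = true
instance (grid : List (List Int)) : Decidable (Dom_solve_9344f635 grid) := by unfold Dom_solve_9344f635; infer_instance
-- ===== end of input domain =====

-- B replaces A's two per-cell neighbour-testing passes and its paint-then-overwrite
-- output construction by a run-length decomposition of each row (a maximal non-bg run of
-- length ≥ 2 marks its row, a length-1 run marks its column) and builds each output row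
-- directly in one pass (objective: alternative; same asymptotic cost, measured constant-factor speedup).

-- grid[r][c]; exact whenever 0 ≤ r < len(grid) and 0 ≤ c < len(grid[r]) (all accesses under Pre_)
def pvGet (grid : List (List Int)) (r c : Int) : Int :=
  PySem.List.pyGetD (PySem.List.pyGetD grid r []) c 0

-- ===== PORT A =====
def solve_9344f635 (grid : List (List Int)) : List (List Int) :=
  let R : Int := grid.length
  let C : Int := (PySem.List.pyGetD grid 0 []).length
  let bg : Int := 7
  let out : List (List Int) := (PySem.List.pyRange 0 R 1).map (fun _ => List.replicate C.toNat bg)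
  let colFills : PySem.Dict Int Int := PySem.Dict.empty
  let rowFills : PySem.Dict Int Int := PySem.Dict.empty
  let rowFills := (PySem.List.pyRange 0 R 1).foldl (fun d r =>
    (PySem.List.pyRange 0 (C - 1) 1).foldl (fun d c =>
      if pvGet grid r c ≠ bg ∧ pvGet grid r (c+1) ≠ bg ∧ pvGet grid r c = pvGet grid r (c+1)
      then d.insert r (pvGet grid r c) else d) d) rowFills
  let colFills := (PySem.List.pyRange 0 R 1).foldl (fun d r =>
    (PySem.List.pyRange 0 C 1).foldl (fun d c =>
      if pvGet grid r c ≠ bg then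
        let isHoriz := false
        let isHoriz := if c > 0 ∧ pvGet grid r (c-1) = pvGet grid r c then true else isHoriz
        let isHoriz := if c < C - 1 ∧ pvGet grid r (c+1) = pvGet grid r c then true else isHoriz
        if isHoriz = false then d.insert c (pvGet grid r c) else d
      else d) d) colFills
  let out := colFills.items.foldl (fun out p =>
    (PySem.List.pyRange 0 R 1).foldl (fun out r =>
      PySem.List.pySetD out r (PySem.List.pySetD (PySem.List.pyGetD out r []) p.1 p.2)) out) out
  let out := rowFills.items.foldl (fun out p =>
    (PySem.List.pyRange 0 C 1).foldl (fun out c =>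
      PySem.List.pySetD out p.1 (PySem.List.pySetD (PySem.List.pyGetD out p.1 []) c p.2)) out) out
  out

-- ===== PORT B =====
-- inner while loop of B: extend the run of value v starting at j as long as row[j+1] == v
def pvRunEnd (g : Int → Int) (n v j : Int) : Int :=
  if h : j + 1 < n ∧ g (j + 1) = v then pvRunEnd g n v (j + 1) else j
termination_by (n - j).toNat
decreasing_by omega

-- needed by pvRunScan's termination proof
theorem pvRunEnd_ge (g : Int → Int) (n v j : Int) : j ≤ pvRunEnd g n v j := by
  unfold pvRunEnd
  split
  · have := pvRunEnd_ge g n v (j + 1); omega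
  · omega
termination_by (n - j).toNat
decreasing_by omega

-- outer while loop of B: walk the row run by run, recording row/column marks
def pvRunScan (g : Int → Int) (n r : Int)
    (st : PySem.Dict Int Int × PySem.Dict Int Int) (c : Int) :
    PySem.Dict Int Int × PySem.Dict Int Int :=
  if h : c < n then
    let v := g c
    let j := pvRunEnd g n v c
    let st' := if v ≠ 7 then
        (if j > c then (st.1.insert r v, st.2) else (st.1, st.2.insert c v))
      else st
    pvRunScan g n r st' (j + 1)
  else st
termination_by (n - c).toNat
decreasing_by
  have := pvRunEnd_ge g n (g c) c; omega

def solve_9344f635_alt (grid : List (List Int)) : List (List Int) :=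
  let R : Int := grid.length
  let C : Int := (PySem.List.pyGetD grid 0 []).length
  let bg : Int := 7
  let fills := (PySem.List.pyRange 0 R 1).foldl
    (fun st r => pvRunScan (fun c => pvGet grid r c) C r st 0)
    ((PySem.Dict.empty : PySem.Dict Int Int), (PySem.Dict.empty : PySem.Dict Int Int))
  (PySem.List.pyRange 0 R 1).map (fun r =>
    match fills.1.get? r with
    | some v => List.replicate C.toNat v
    | none => (PySem.List.pyRange 0 C 1).map (fun c => fills.2.getD c bg))

-- ===== PRECONDITION & SPEC =====
-- Pre_ excludes exactly the inputs on which A raises: the empty grid (grid[0] is an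
-- IndexError) and ragged grids with a row shorter than the first row (grid[r][c] raises).
def Pre_solve_9344f635 (grid : List (List Int)) : Prop :=
  grid ≠ [] ∧ ∀ row ∈ grid, (grid.headI).length ≤ row.length
instance (grid : List (List Int)) : Decidable (Pre_solve_9344f635 grid) := by
  unfold Pre_solve_9344f635; infer_instance
def pvWitness_solve_9344f635 : List (List Int) := [[7, 1], [2, 2]]
def Spec_solve_9344f635 (grid : List (List Int)) (out : List (List Int)) : Prop := out = solve_9344f635_alt grid
instance (grid : List (List Int)) (out : List (List Int)) : Decidable (Spec_solve_9344f635 grid out) := by unfold Spec_solve_9344f635; infer_instance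

-- ===== CLAIM (what is proved, stated in full; the proofs are below) =====
def Claim_equal_solve_9344f635 : Prop := ∀ (grid : List (List Int)), Dom_solve_9344f635 grid → Pre_solve_9344f635 grid → Spec_solve_9344f635 grid (solve_9344f635 grid)

-- ===== LEMMAS AND PROOFS =====

-- an R×C matrix given by an entry function
def pvMk (R C : Int) (h : Int → Int → Int) : List (List Int) :=
  (PySem.List.pyRange 0 R 1).map (fun r => (PySem.List.pyRange 0 C 1).map (fun c => h r c))

theorem pvMk_congr (R C : Int) (h₁ h₂ : Int → Int → Int)
    (h : ∀ r c, 0 ≤ r → r < R → 0 ≤ c → c < C → h₁ r c = h₂ r c) :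
    pvMk R C h₁ = pvMk R C h₂ := by
  unfold pvMk
  apply List.map_congr_left
  intro r hr
  rw [PySem.List.mem_pyRange_one] at hr
  apply List.map_congr_left
  intro c hc
  rw [PySem.List.mem_pyRange_one] at hc
  exact h r c hr.1 hr.2 hc.1 hc.2

theorem pvSetD_map_pyRange {α : Type} (n : Int) (F : Int → α) (i : Int)
    (h0 : 0 ≤ i) (h1 : i < n) (v : α) :
    PySem.List.pySetD ((PySem.List.pyRange 0 n 1).map F) i v
      = (PySem.List.pyRange 0 n 1).map (fun j => if j = i then v else F j) := by
  rw [PySem.List.pySetD_of_nonneg _ v h0]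
  apply List.ext_getElem
  · simp
  · intro k hk1 hk2
    have hkn : (k : Int) < n := by
      simp [PySem.List.length_pyRange_one] at hk2
      omega
    rw [List.getElem_set]
    simp only [List.getElem_map, PySem.List.getElem_pyRange_one, zero_add]
    split_ifs with hik hki hki
    · rfl
    · exfalso; apply hki; omega
    · exfalso; apply hik; omega
    · rfl

theorem pvSetD_idem (l : List Int) (i : Int) (v : Int) (h : 0 ≤ i) :
    PySem.List.pySetD (PySem.List.pySetD l i v) i v = PySem.List.pySetD l i v := by
  rw [PySem.List.pySetD_of_nonneg _ v h, PySem.List.pySetD_of_nonneg _ v h, List.set_set]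

theorem pvColLoop (R : Int) (c0 v : Int) (hc0 : 0 ≤ c0)
    (l : List Int) (hl : ∀ r ∈ l, 0 ≤ r ∧ r < R) (G : Int → List Int) :
    l.foldl (fun out r =>
        PySem.List.pySetD out r (PySem.List.pySetD (PySem.List.pyGetD out r []) c0 v))
      ((PySem.List.pyRange 0 R 1).map G)
      = (PySem.List.pyRange 0 R 1).map
          (fun r => if r ∈ l then PySem.List.pySetD (G r) c0 v else G r) := by
  induction l generalizing G with
  | nil => simp
  | cons r0 t ih =>
    obtain ⟨hr00, hr01⟩ := hl r0 (List.mem_cons_self ..)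
    simp only [List.foldl_cons]
    rw [PySem.List.pyGetD_map_pyRange_of_nonneg G R r0 [] hr00 hr01,
        pvSetD_map_pyRange R G r0 hr00 hr01,
        ih (fun r hr => hl r (List.mem_cons_of_mem _ hr))]
    apply List.map_congr_left
    intro r _
    by_cases hrt : r ∈ t <;> by_cases hrr : r = r0 <;>
      simp [hrt, hrr, pvSetD_idem _ c0 v hc0]

theorem pvColFillStep (R C : Int) (c0 v : Int) (h0 : 0 ≤ c0) (h1 : c0 < C)
    (h : Int → Int → Int) :
    (PySem.List.pyRange 0 R 1).foldl (fun out r =>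
        PySem.List.pySetD out r (PySem.List.pySetD (PySem.List.pyGetD out r []) c0 v))
      (pvMk R C h)
      = pvMk R C (fun r c => if c = c0 then v else h r c) := by
  unfold pvMk
  rw [pvColLoop R c0 v h0 (PySem.List.pyRange 0 R 1)
      (fun r hr => by rw [PySem.List.mem_pyRange_one] at hr; exact ⟨hr.1, hr.2⟩)
      (fun r => (PySem.List.pyRange 0 C 1).map (fun c => h r c))]
  apply List.map_congr_left
  intro r hr
  rw [if_pos hr, pvSetD_map_pyRange C (fun c => h r c) c0 h0 h1 v]

theorem pvRowLoop (R C : Int) (r0 v : Int) (hr0 : 0 ≤ r0) (hr1 : r0 < R)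
    (l : List Int) (hl : ∀ c ∈ l, 0 ≤ c ∧ c < C) (h : Int → Int → Int) :
    l.foldl (fun out c =>
        PySem.List.pySetD out r0 (PySem.List.pySetD (PySem.List.pyGetD out r0 []) c v))
      (pvMk R C h)
      = pvMk R C (fun r c => if r = r0 ∧ c ∈ l then v else h r c) := by
  induction l generalizing h with
  | nil => simp [pvMk]
  | cons c0 t ih =>
    obtain ⟨hc00, hc01⟩ := hl c0 (List.mem_cons_self ..)
    simp only [List.foldl_cons]
    have hrow : PySem.List.pyGetD (pvMk R C h) r0 []
        = (PySem.List.pyRange 0 C 1).map (fun c => h r0 c) :=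
      PySem.List.pyGetD_map_pyRange_of_nonneg _ R r0 [] hr0 hr1
    have hset : PySem.List.pySetD (pvMk R C h) r0
          (PySem.List.pySetD (PySem.List.pyGetD (pvMk R C h) r0 []) c0 v)
        = pvMk R C (fun r c => if r = r0 then (if c = c0 then v else h r0 c) else h r c) := by
      rw [hrow, pvSetD_map_pyRange C (fun c => h r0 c) c0 hc00 hc01 v]
      unfold pvMk
      rw [pvSetD_map_pyRange R _ r0 hr0 hr1]
      apply List.map_congr_left
      intro r _
      by_cases hrr : r = r0 <;> simp [hrr]
    rw [hset, ih (fun c hc => hl c (List.mem_cons_of_mem _ hc))]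
    apply pvMk_congr
    intro r c _ _ _ _
    by_cases hrr : r = r0 <;> by_cases hcc : c = c0 <;> by_cases hct : c ∈ t <;>
      simp [hrr, hcc, hct]

theorem pvRowFillStep (R C : Int) (r0 v : Int) (hr0 : 0 ≤ r0) (hr1 : r0 < R)
    (h : Int → Int → Int) :
    (PySem.List.pyRange 0 C 1).foldl (fun out c =>
        PySem.List.pySetD out r0 (PySem.List.pySetD (PySem.List.pyGetD out r0 []) c v))
      (pvMk R C h)
      = pvMk R C (fun r c => if r = r0 then v else h r c) := by
  rw [pvRowLoop R C r0 v hr0 hr1 (PySem.List.pyRange 0 C 1)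
      (fun c hc => by rw [PySem.List.mem_pyRange_one] at hc; exact ⟨hc.1, hc.2⟩) h]
  apply pvMk_congr
  intro r c _ _ hc0 hc1
  have : c ∈ PySem.List.pyRange 0 C 1 := by rw [PySem.List.mem_pyRange_one]; omega
  by_cases hrr : r = r0 <;> simp [hrr, this]

theorem pvColItems (R C : Int) (ps : List (Int × Int)) (hnd : (ps.map Prod.fst).Nodup)
    (hb : ∀ p ∈ ps, 0 ≤ p.1 ∧ p.1 < C) (h : Int → Int → Int) :
    ps.foldl (fun out p =>
        (PySem.List.pyRange 0 R 1).foldl (fun out r =>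
          PySem.List.pySetD out r
            (PySem.List.pySetD (PySem.List.pyGetD out r []) p.1 p.2)) out)
      (pvMk R C h)
      = pvMk R C (fun r c => (PySem.Dict.mk ps).getD c (h r c)) := by
  induction ps generalizing h with
  | nil =>
    apply pvMk_congr
    intro r c _ _ _ _
    rw [PySem.Dict.getD_eq_get?_getD]
    rfl
  | cons p t ih =>
    obtain ⟨hb0, hb1⟩ := hb p (List.mem_cons_self ..)
    simp only [List.foldl_cons]
    rw [pvColFillStep R C p.1 p.2 hb0 hb1 h,
        ih (by simp at hnd ⊢; exact hnd.2) (fun q hq => hb q (List.mem_cons_of_mem _ hq))]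
    apply pvMk_congr
    intro r c _ _ _ _
    rw [PySem.Dict.getD_eq_get?_getD, PySem.Dict.getD_eq_get?_getD]
    obtain ⟨p1, p2⟩ := p
    rw [PySem.Dict.get?_mk_cons]
    by_cases hcc : c = p1
    · subst hcc
      have hnone : (PySem.Dict.mk t).get? c = none := by
        rw [PySem.Dict.get?_eq_none_iff_not_mem_keys]
        simp only [List.map_cons, List.nodup_cons] at hnd
        exact hnd.1
      simp [hnone]
    · have : ¬ (p1 == c) = true := by simpa using fun hh => hcc hh.symm
      simp [this, hcc]

theorem pvRowItems (R C : Int) (ps : List (Int × Int)) (hnd : (ps.map Prod.fst).Nodup)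
    (hb : ∀ p ∈ ps, 0 ≤ p.1 ∧ p.1 < R) (h : Int → Int → Int) :
    ps.foldl (fun out p =>
        (PySem.List.pyRange 0 C 1).foldl (fun out c =>
          PySem.List.pySetD out p.1
            (PySem.List.pySetD (PySem.List.pyGetD out p.1 []) c p.2)) out)
      (pvMk R C h)
      = pvMk R C (fun r c => (PySem.Dict.mk ps).getD r (h r c)) := by
  induction ps generalizing h with
  | nil =>
    apply pvMk_congr
    intro r c _ _ _ _
    rw [PySem.Dict.getD_eq_get?_getD]
    rfl
  | cons p t ih =>
    obtain ⟨hb0, hb1⟩ := hb p (List.mem_cons_self ..)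
    simp only [List.foldl_cons]
    rw [pvRowFillStep R C p.1 p.2 hb0 hb1 h,
        ih (by simp at hnd ⊢; exact hnd.2) (fun q hq => hb q (List.mem_cons_of_mem _ hq))]
    apply pvMk_congr
    intro r c _ _ _ _
    rw [PySem.Dict.getD_eq_get?_getD, PySem.Dict.getD_eq_get?_getD]
    obtain ⟨p1, p2⟩ := p
    rw [PySem.Dict.get?_mk_cons]
    by_cases hrr : r = p1
    · subst hrr
      have hnone : (PySem.Dict.mk t).get? r = none := by
        rw [PySem.Dict.get?_eq_none_iff_not_mem_keys]
        simp only [List.map_cons, List.nodup_cons] at hnd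
        exact hnd.1
      simp [hnone]
    · have : ¬ (p1 == r) = true := by simpa using fun hh => hrr hh.symm
      simp [this, hrr]

theorem pvFoldl_inv {α β : Type} (Inv : β → Prop) (f : β → α → β) (l : List α) (d : β)
    (hd : Inv d) (hstep : ∀ b x, x ∈ l → Inv b → Inv (f b x)) : Inv (l.foldl f d) := by
  induction l generalizing d with
  | nil => exact hd
  | cons x t ih =>
    exact ih (f d x) (hstep d x (List.mem_cons_self ..) hd)
      (fun b y hy => hstep b y (List.mem_cons_of_mem _ hy))

theorem pvMkItems {κ ν : Type} [BEq κ] (d : PySem.Dict κ ν) : PySem.Dict.mk d.items = d := by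
  cases d
  rfl

-- A's column dict (proof name for the fold inside the port)
def pvColDictA (grid : List (List Int)) : PySem.Dict Int Int :=
  (PySem.List.pyRange 0 (grid.length : Int) 1).foldl (fun d r =>
    (PySem.List.pyRange 0 ((PySem.List.pyGetD grid 0 []).length : Int) 1).foldl (fun d c =>
      if pvGet grid r c ≠ 7 then
        let isHoriz := false
        let isHoriz := if c > 0 ∧ pvGet grid r (c-1) = pvGet grid r c then true else isHoriz
        let isHoriz := if c < ((PySem.List.pyGetD grid 0 []).length : Int) - 1 ∧ pvGet grid r (c+1) = pvGet grid r c then true else isHoriz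
        if isHoriz = false then d.insert c (pvGet grid r c) else d
      else d) d) PySem.Dict.empty

-- A's row dict
def pvRowDictA (grid : List (List Int)) : PySem.Dict Int Int :=
  (PySem.List.pyRange 0 (grid.length : Int) 1).foldl (fun d r =>
    (PySem.List.pyRange 0 (((PySem.List.pyGetD grid 0 []).length : Int) - 1) 1).foldl (fun d c =>
      if pvGet grid r c ≠ 7 ∧ pvGet grid r (c+1) ≠ 7 ∧ pvGet grid r c = pvGet grid r (c+1)
      then d.insert r (pvGet grid r c) else d) d) PySem.Dict.empty

theorem pvOut0 (R C : Int) :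
    (PySem.List.pyRange 0 R 1).map (fun _ => List.replicate C.toNat (7 : Int))
      = pvMk R C (fun _ _ => 7) := by
  unfold pvMk
  apply List.map_congr_left
  intro r _
  apply List.ext_getElem
  · simp [PySem.List.length_pyRange_one]
  · intro k h1 h2
    simp

theorem pvColDictA_inv (grid : List (List Int)) :
    (pvColDictA grid).keys.Nodup ∧
      ∀ k ∈ (pvColDictA grid).keys,
        0 ≤ k ∧ k < ((PySem.List.pyGetD grid 0 []).length : Int) := by
  unfold pvColDictA
  apply pvFoldl_inv (Inv := fun d : PySem.Dict Int Int => d.keys.Nodup ∧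
    ∀ k ∈ d.keys, 0 ≤ k ∧ k < ((PySem.List.pyGetD grid 0 []).length : Int))
  · simp [PySem.Dict.keys_empty]
  · intro b r _ hb
    apply pvFoldl_inv (Inv := fun d : PySem.Dict Int Int => d.keys.Nodup ∧
      ∀ k ∈ d.keys, 0 ≤ k ∧ k < ((PySem.List.pyGetD grid 0 []).length : Int))
    · exact hb
    · intro d c hc hd
      rw [PySem.List.mem_pyRange_one] at hc
      have hins : (d.insert c (pvGet grid r c)).keys.Nodup ∧
          ∀ k ∈ (d.insert c (pvGet grid r c)).keys,
            0 ≤ k ∧ k < ((PySem.List.pyGetD grid 0 []).length : Int) := by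
        refine ⟨PySem.Dict.nodup_keys_insert d c _ hd.1, ?_⟩
        intro k hk
        rw [PySem.Dict.mem_keys_insert] at hk
        rcases hk with rfl | hk
        · exact hc
        · exact hd.2 k hk
      simp only []
      split_ifs <;> first | exact hd | exact hins

theorem pvRowDictA_inv (grid : List (List Int)) :
    (pvRowDictA grid).keys.Nodup ∧
      ∀ k ∈ (pvRowDictA grid).keys, 0 ≤ k ∧ k < (grid.length : Int) := by
  unfold pvRowDictA
  apply pvFoldl_inv (Inv := fun d : PySem.Dict Int Int => d.keys.Nodup ∧
    ∀ k ∈ d.keys, 0 ≤ k ∧ k < (grid.length : Int))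
  · simp [PySem.Dict.keys_empty]
  · intro b r hr hb
    rw [PySem.List.mem_pyRange_one] at hr
    apply pvFoldl_inv (Inv := fun d : PySem.Dict Int Int => d.keys.Nodup ∧
      ∀ k ∈ d.keys, 0 ≤ k ∧ k < (grid.length : Int))
    · exact hb
    · intro d c _ hd
      split_ifs with h1
      · refine ⟨PySem.Dict.nodup_keys_insert d r _ hd.1, ?_⟩
        intro k hk
        rw [PySem.Dict.mem_keys_insert] at hk
        rcases hk with rfl | hk
        · exact hr
        · exact hd.2 k hk
      · exact hd

theorem pvA_char (grid : List (List Int)) :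
    solve_9344f635 grid
      = pvMk (grid.length : Int) ((PySem.List.pyGetD grid 0 []).length : Int)
          (fun r c => (pvRowDictA grid).getD r ((pvColDictA grid).getD c 7)) := by
  obtain ⟨hcn, hcb⟩ := pvColDictA_inv grid
  obtain ⟨hrn, hrb⟩ := pvRowDictA_inv grid
  show ((pvRowDictA grid).items.foldl _
      ((pvColDictA grid).items.foldl _
        ((PySem.List.pyRange 0 (grid.length : Int) 1).map
          (fun _ => List.replicate ((PySem.List.pyGetD grid 0 []).length : Int).toNat 7)))) = _
  rw [pvOut0]
  rw [pvColItems (grid.length : Int) ((PySem.List.pyGetD grid 0 []).length : Int)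
        (pvColDictA grid).items hcn
        (fun p hp => hcb p.1 (List.mem_map_of_mem hp)) (fun _ _ => 7),
      pvMkItems]
  rw [pvRowItems (grid.length : Int) ((PySem.List.pyGetD grid 0 []).length : Int)
        (pvRowDictA grid).items hrn
        (fun p hp => hrb p.1 (List.mem_map_of_mem hp))
        (fun r c => (pvColDictA grid).getD c 7),
      pvMkItems]

-- ========== B-side: the run scan equals A's two per-row folds ==========

-- the body of A's per-row row_fills fold, with the row abstracted as g
def pvRowBody (g : Int → Int) (r : Int) : PySem.Dict Int Int → Int → PySem.Dict Int Int :=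
  fun d c => if g c ≠ 7 ∧ g (c+1) ≠ 7 ∧ g c = g (c+1) then d.insert r (g c) else d

-- the body of A's per-row col_fills fold
def pvColBody (g : Int → Int) (n : Int) : PySem.Dict Int Int → Int → PySem.Dict Int Int :=
  fun d c => if g c ≠ 7 then
      let isHoriz := false
      let isHoriz := if c > 0 ∧ g (c-1) = g c then true else isHoriz
      let isHoriz := if c < n - 1 ∧ g (c+1) = g c then true else isHoriz
      if isHoriz = false then d.insert c (g c) else d
    else d

theorem pvRunEnd_lt (g : Int → Int) (n v j : Int) (h : j < n) : pvRunEnd g n v j < n := by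
  unfold pvRunEnd
  split
  · exact pvRunEnd_lt g n v (j + 1) (by omega)
  · exact h
termination_by (n - j).toNat
decreasing_by omega

theorem pvRunEnd_run (g : Int → Int) (n v j : Int) (hv : g j = v) :
    ∀ k, j < k → k ≤ pvRunEnd g n v j → g k = v := by
  unfold pvRunEnd
  split
  case isTrue h =>
    intro k hk1 hk2
    by_cases hkj : k = j + 1
    · rw [hkj]; exact h.2
    · exact pvRunEnd_run g n v (j + 1) h.2 k (by omega) hk2
  case isFalse h =>
    intro k hk1 hk2
    omega
termination_by (n - j).toNat
decreasing_by omega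

theorem pvRunEnd_stop (g : Int → Int) (n v j : Int) :
    n ≤ pvRunEnd g n v j + 1 ∨ g (pvRunEnd g n v j + 1) ≠ v := by
  unfold pvRunEnd
  split
  · exact pvRunEnd_stop g n v (j + 1)
  case isFalse h =>
    by_cases h1 : j + 1 < n
    · right; intro hc; exact h ⟨h1, hc⟩
    · left; omega
termination_by (n - j).toNat
decreasing_by omega

-- the row fold over one run collapses to (at most) one insert
theorem pvRowRun (g : Int → Int) (n r v c0 j : Int)
    (hv : g c0 = v) (hrun : ∀ k, c0 < k → k ≤ j → g k = v)
    (hj : c0 ≤ j) (hjn : j < n) (hstop : n ≤ j + 1 ∨ g (j+1) ≠ v)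
    (m : Int) (hm0 : c0 ≤ m) (hm1 : m ≤ j + 1) (d : PySem.Dict Int Int) :
    (PySem.List.pyRange m (n-1) 1).foldl (pvRowBody g r) d
      = (PySem.List.pyRange (j+1) (n-1) 1).foldl (pvRowBody g r)
          (if v ≠ 7 ∧ m < j then d.insert r v else d) := by
  by_cases hmj : m = j + 1
  · subst hmj
    rw [if_neg (by omega)]
  · have hgm : g m = v := by
      rcases eq_or_lt_of_le hm0 with h | h
      · rw [← h]; exact hv
      · exact hrun m h (by omega)
    by_cases hmn1 : m < n - 1
    · rw [PySem.List.pyRange_one_cons hmn1, List.foldl_cons]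
      by_cases hmj2 : m < j
      · have hgm1 : g (m+1) = v := hrun (m+1) (by omega) (by omega)
        have hbody : pvRowBody g r d m = if v ≠ 7 then d.insert r v else d := by
          simp only [pvRowBody, hgm, hgm1]
          by_cases hv7 : v = 7 <;> simp [hv7]
        rw [hbody,
          pvRowRun g n r v c0 j hv hrun hj hjn hstop (m+1) (by omega) (by omega) _]
        congr 1
        by_cases hv7 : v = 7
        · simp [hv7]
        · by_cases h2 : m + 1 < j <;>
            simp [hv7, hmj2, h2, PySem.Dict.insert_insert_self]
      · have hmj3 : m = j := by omega
        have hst : g (j+1) ≠ v := by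
          rcases hstop with h | h
          · omega
          · exact h
        have hbody : pvRowBody g r d m = d := by
          simp only [pvRowBody]
          rw [if_neg]
          rintro ⟨_, _, hc3⟩
          rw [hmj3] at hgm hc3
          exact hst (hc3 ▸ hgm)
        subst hmj3
        rw [hbody, pvRowRun g n r v c0 m hv hrun hj hjn hstop (m+1) (by omega) (by omega) d,
          if_neg (by omega), if_neg (by omega)]
    · have hmeq : m = j ∧ j = n - 1 := by omega
      rw [PySem.List.pyRange_one_eq_nil (by omega),
          PySem.List.pyRange_one_eq_nil (by omega), List.foldl_nil, List.foldl_nil,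
          if_neg (by omega)]
termination_by (j + 1 - m).toNat
decreasing_by all_goals omega

-- the col fold over one run collapses to (at most) one insert
theorem pvColRun (g : Int → Int) (n v c0 j : Int)
    (hv : g c0 = v) (hrun : ∀ k, c0 < k → k ≤ j → g k = v)
    (hj : c0 ≤ j) (hjn : j < n) (hstop : n ≤ j + 1 ∨ g (j+1) ≠ v)
    (hstart : c0 = 0 ∨ g (c0 - 1) ≠ v)
    (m : Int) (hm00 : 0 ≤ c0) (hm0 : c0 ≤ m) (hm1 : m ≤ j + 1) (d : PySem.Dict Int Int) :
    (PySem.List.pyRange m n 1).foldl (pvColBody g n) d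
      = (PySem.List.pyRange (j+1) n 1).foldl (pvColBody g n)
          (if v ≠ 7 ∧ m = c0 ∧ j = c0 then d.insert c0 v else d) := by
  by_cases hmj : m = j + 1
  · subst hmj
    rw [if_neg (by omega)]
  · have hmn : m < n := by omega
    have hgm : g m = v := by
      rcases eq_or_lt_of_le hm0 with h | h
      · rw [← h]; exact hv
      · exact hrun m h (by omega)
    rw [PySem.List.pyRange_one_cons hmn, List.foldl_cons]
    by_cases hv7 : v = 7
    · have hbody : pvColBody g n d m = d := by
        simp only [pvColBody]
        rw [if_neg (by rw [hgm, hv7]; simp)]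
      rw [hbody, pvColRun g n v c0 j hv hrun hj hjn hstop hstart (m+1) hm00 (by omega) (by omega) d,
        if_neg (by simp [hv7]), if_neg (by simp [hv7])]
    · -- v ≠ 7: compute is_horiz at m
      by_cases hsing : m = c0 ∧ j = c0
      · -- singleton run: no horizontal neighbour, insert
        obtain ⟨hm2, hj2⟩ := hsing
        have hleft : ¬ (m > 0 ∧ g (m-1) = g m) := by
          rintro ⟨h1, h2⟩
          rw [hm2] at h1 h2
          rcases hstart with h | h
          · omega
          · apply h; rw [h2]; exact hv
        have hright : ¬ (m < n - 1 ∧ g (m+1) = g m) := by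
          rintro ⟨h1, h2⟩
          rcases hstop with h | h
          · omega
          · apply h; rw [hj2, ← hm2, h2]; exact hgm
        have hbody : pvColBody g n d m = d.insert c0 v := by
          simp only [pvColBody]
          rw [if_pos (by rw [hgm]; exact hv7)]
          rw [if_neg hleft, if_neg hright]
          rw [hgm, hm2]
          simp
        rw [hbody, pvColRun g n v c0 j hv hrun hj hjn hstop hstart (m+1) hm00 (by omega) (by omega) _,
          if_neg (by omega), if_pos ⟨hv7, hm2, hj2⟩]
      · -- m is inside a run of length ≥ 2: is_horiz is true, no insert
        have hhoriz : (m > 0 ∧ g (m-1) = g m) ∨ (m < n - 1 ∧ g (m+1) = g m) := by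
          by_cases hm2 : m = c0
          · -- then j ≠ c0, so c0 < j and the right neighbour is in the run
            have hcj : c0 < j := by
              rcases lt_or_eq_of_le hj with h | h
              · exact h
              · exact absurd ⟨hm2, h.symm⟩ hsing
            right
            constructor
            · omega
            · rw [hgm, hm2]
              exact hrun (c0+1) (by omega) (by omega)
          · -- m > c0: the left neighbour is in the run
            left
            constructor
            · omega
            · rw [hgm]
              rcases eq_or_lt_of_le (show c0 ≤ m - 1 by omega) with h | h
              · rw [← h]; exact hv
              · exact hrun (m-1) h (by omega)
        have hbody : pvColBody g n d m = d := by
          simp only [pvColBody]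
          rw [if_pos (by rw [hgm]; exact hv7)]
          by_cases hA : (m > 0 ∧ g (m-1) = g m) <;>
            by_cases hB : (m < n - 1 ∧ g (m+1) = g m) <;>
            simp [hA, hB] <;> tauto
        rw [hbody, pvColRun g n v c0 j hv hrun hj hjn hstop hstart (m+1) hm00 (by omega) (by omega) d]
        congr 1
        rw [if_neg (by omega), if_neg (by rintro ⟨_, h2, h3⟩; exact hsing ⟨h2, h3⟩)]
termination_by (j + 1 - m).toNat
decreasing_by all_goals omega

-- MAIN: B's run scan from a run start computes A's two suffix folds
theorem pvRunScan_eq (g : Int → Int) (n r c0 : Int) (d1 d2 : PySem.Dict Int Int)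
    (h0 : 0 ≤ c0) (hstart : c0 = 0 ∨ n ≤ c0 ∨ g (c0-1) ≠ g c0) :
    pvRunScan g n r (d1, d2) c0
      = ((PySem.List.pyRange c0 (n-1) 1).foldl (pvRowBody g r) d1,
         (PySem.List.pyRange c0 n 1).foldl (pvColBody g n) d2) := by
  by_cases hcn : c0 < n
  case neg =>
    unfold pvRunScan
    rw [dif_neg hcn, PySem.List.pyRange_one_eq_nil (by omega),
        PySem.List.pyRange_one_eq_nil (by omega)]
    rfl
  case pos =>
    have hj := pvRunEnd_ge g n (g c0) c0
    have hjn := pvRunEnd_lt g n (g c0) c0 hcn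
    have hrun := pvRunEnd_run g n (g c0) c0 rfl
    have hstop := pvRunEnd_stop g n (g c0) c0
    have hstep : pvRunScan g n r (d1, d2) c0
        = pvRunScan g n r
            (if g c0 ≠ 7 then
              (if pvRunEnd g n (g c0) c0 > c0
                then ((d1.insert r (g c0)), d2)
                else (d1, d2.insert c0 (g c0)))
            else (d1, d2))
            (pvRunEnd g n (g c0) c0 + 1) := by
      conv_lhs => unfold pvRunScan
      rw [dif_pos hcn]
    rw [hstep]
    have hpair : (if g c0 ≠ 7 then
          (if pvRunEnd g n (g c0) c0 > c0
            then ((d1.insert r (g c0)), d2)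
            else (d1, d2.insert c0 (g c0)))
        else (d1, d2))
        = ((if g c0 ≠ 7 ∧ c0 < pvRunEnd g n (g c0) c0 then d1.insert r (g c0) else d1),
           (if g c0 ≠ 7 ∧ c0 = c0 ∧ pvRunEnd g n (g c0) c0 = c0 then d2.insert c0 (g c0) else d2)) := by
      by_cases h7 : g c0 = 7 <;> by_cases he : c0 < pvRunEnd g n (g c0) c0 <;>
        simp [h7, he, gt_iff_lt] <;> omega
    rw [hpair]
    have hstart' : pvRunEnd g n (g c0) c0 + 1 = 0 ∨ n ≤ pvRunEnd g n (g c0) c0 + 1 ∨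
        g (pvRunEnd g n (g c0) c0 + 1 - 1) ≠ g (pvRunEnd g n (g c0) c0 + 1) := by
      rcases hstop with h | h
      · right; left; exact h
      · right; right
        have hge : g (pvRunEnd g n (g c0) c0) = g c0 := by
          rcases eq_or_lt_of_le hj with h2 | h2
          · rw [← h2]
          · exact hrun _ h2 le_rfl
        rw [show pvRunEnd g n (g c0) c0 + 1 - 1 = pvRunEnd g n (g c0) c0 by ring, hge]
        intro hc
        exact h hc.symm
    rw [pvRunScan_eq g n r (pvRunEnd g n (g c0) c0 + 1) _ _ (by omega) hstart']
    have hstart2 : c0 = 0 ∨ g (c0 - 1) ≠ g c0 := by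
      rcases hstart with h | h | h
      · left; exact h
      · omega
      · right; exact h
    rw [← pvRowRun g n r (g c0) c0 (pvRunEnd g n (g c0) c0) rfl hrun hj hjn hstop c0
          le_rfl (by omega) d1,
        ← pvColRun g n (g c0) c0 (pvRunEnd g n (g c0) c0) rfl hrun hj hjn hstop hstart2 c0
          h0 le_rfl (by omega) d2]
termination_by (n - c0).toNat
decreasing_by omega

theorem pvReplicate_eq (C : Int) (v : Int) :
    List.replicate C.toNat v = (PySem.List.pyRange 0 C 1).map (fun _ => v) := by
  apply List.ext_getElem
  · simp [PySem.List.length_pyRange_one]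
  · intro k h1 h2
    simp

theorem pvB_char (grid : List (List Int)) :
    solve_9344f635_alt grid
      = pvMk (grid.length : Int) ((PySem.List.pyGetD grid 0 []).length : Int)
          (fun r c => (pvRowDictA grid).getD r ((pvColDictA grid).getD c 7)) := by
  have hfold : (PySem.List.pyRange 0 (grid.length : Int) 1).foldl
      (fun st r => pvRunScan (fun c => pvGet grid r c) ((PySem.List.pyGetD grid 0 []).length : Int) r st 0)
      ((PySem.Dict.empty : PySem.Dict Int Int), (PySem.Dict.empty : PySem.Dict Int Int))
      = (pvRowDictA grid, pvColDictA grid) := by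
    rw [PySem.List.foldl_congr_mem _ _
      (fun (st : PySem.Dict Int Int × PySem.Dict Int Int) r =>
        ((PySem.List.pyRange 0 (((PySem.List.pyGetD grid 0 []).length : Int) - 1) 1).foldl
            (pvRowBody (fun c => pvGet grid r c) r) st.1,
         (PySem.List.pyRange 0 ((PySem.List.pyGetD grid 0 []).length : Int) 1).foldl
            (pvColBody (fun c => pvGet grid r c) ((PySem.List.pyGetD grid 0 []).length : Int)) st.2))
      _ ?_]
    · rw [PySem.List.foldl_prod_mk
        (f := fun (a : PySem.Dict Int Int) r =>
          (PySem.List.pyRange 0 (((PySem.List.pyGetD grid 0 []).length : Int) - 1) 1).foldl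
            (pvRowBody (fun c => pvGet grid r c) r) a)
        (g := fun (a : PySem.Dict Int Int) r =>
          (PySem.List.pyRange 0 ((PySem.List.pyGetD grid 0 []).length : Int) 1).foldl
            (pvColBody (fun c => pvGet grid r c) ((PySem.List.pyGetD grid 0 []).length : Int)) a)]
      rfl
    · intro st r _
      obtain ⟨a, b⟩ := st
      exact pvRunScan_eq (fun c => pvGet grid r c)
        ((PySem.List.pyGetD grid 0 []).length : Int) r 0 a b le_rfl (Or.inl rfl)
  show (PySem.List.pyRange 0 (grid.length : Int) 1).map _ = _
  rw [hfold]
  dsimp only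
  unfold pvMk
  apply List.map_congr_left
  intro r _
  cases hg : (pvRowDictA grid).get? r with
  | some v =>
    dsimp only
    rw [pvReplicate_eq]
    apply List.map_congr_left
    intro c _
    dsimp only
    rw [PySem.Dict.getD_eq_get?_getD, hg]
    rfl
  | none =>
    dsimp only
    apply List.map_congr_left
    intro c _
    dsimp only
    conv_rhs => rw [PySem.Dict.getD_eq_get?_getD]
    rw [hg]
    rfl

-- ===== VERDICT (by name: the statement is the Claim_ definition above) =====
theorem solve_9344f635_spec : Claim_equal_solve_9344f635 := by
  intro grid _ _
  unfold Spec_solve_9344f635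
  rw [pvA_char grid, pvB_char grid]
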